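-- pv_equiv track=rewrite | github.com/ooigavin/DSA | math_qns/solutions.py | target_array
-- ===== SOURCE A (Python) =====
-- def target_array(target_arr):
--   from heapq import heappushpop, heapify
--
--   heap = []
--   total = 0
--   for n in target_arr:
--     total += n
--     heap.append(-n)
--   heapify(heap)
--
--   # if largest value in the heap is 1, then the arr is valid
--   while heap[0] < -1:
--     largest = -heap[0]
--     remainder = total - largest
--     # remainder can be >= the largest value
--     # smallest value of the remainder should be 1 which is the smallest possible value
--     if remainder >= largest or remainder < 1:
--       return False
--
--     # use mod to find the value after subtracting remainder from largest the most times
--     new_val = largest % remainder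
--     # smallest possible value should be 1
--     # if new_val is 0 AND remainder is not 1 this operation is invalid
--     if new_val == 0 and remainder != 1:
--       return False
--     heappushpop(heap, -new_val)
--     total += new_val - largest
--   return True
-- ===== SOURCE B (Python) =====
-- def target_array(target_arr):
--   # simpler: plain list with repeated max-scan instead of a heap of negated values
--   lst = list(target_arr)
--   total = sum(lst)
--   while True:
--     largest = lst[0]
--     idx = 0
--     for i in range(1, len(lst)):
--       if lst[i] > largest:
--         largest = lst[i]
--         idx = i
--     if largest <= 1:
--       return True
--     remainder = total - largest
--     if remainder >= largest or remainder < 1: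
--       return False
--     new_val = largest % remainder
--     if new_val == 0 and remainder != 1:
--       return False
--     lst[idx] = new_val
--     total += new_val - largest
-- ===== Notes on version B (the rewrite author's own statement) =====
-- stated objective: simpler
-- what changed: Replaces the heapq min-heap of negated values by a plain list with a repeated max-scan and in-place update at the max index, dropping the negation trick and heap maintenance (the C-level sum/scan also gives a constant-factor speedup).
import Mathlib
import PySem

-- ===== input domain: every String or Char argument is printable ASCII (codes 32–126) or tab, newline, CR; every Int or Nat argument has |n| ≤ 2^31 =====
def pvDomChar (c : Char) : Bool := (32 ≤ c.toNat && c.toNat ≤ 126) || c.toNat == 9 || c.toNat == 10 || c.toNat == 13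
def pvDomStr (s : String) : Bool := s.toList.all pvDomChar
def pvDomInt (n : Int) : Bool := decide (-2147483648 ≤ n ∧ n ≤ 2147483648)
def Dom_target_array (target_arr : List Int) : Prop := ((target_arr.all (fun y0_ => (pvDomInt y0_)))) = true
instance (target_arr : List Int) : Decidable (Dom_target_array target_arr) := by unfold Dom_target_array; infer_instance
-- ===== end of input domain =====

-- B replaces A's heap of negated values by a plain list with a repeated max-scan (simpler, no heapq);
-- both raise IndexError on [] (excluded by Pre_); B mutates only a local copy, never the argument.

-- ===== PORT A =====
-- heapq is a library A imports; its two calls are ported by contract on a min-first (sorted) list: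
-- heapify = sort ascending (index 0 = min, exact for A's use), heappushpop = if root < item then
-- replace root by item and restore order, else leave the heap alone.  The fuel parameter only makes
-- the while-loop total; it is chosen large enough that it never runs out (total strictly decreases
-- and each continuing iteration needs total ≥ 3).
def pyHeapPushPop (heap : List Int) (item : Int) : List Int :=
  match heap with
  | [] => heap
  | h :: t => if h < item then List.orderedInsert (· ≤ ·) item t else heap

def targetLoopA : Nat → List Int → Int → Bool
  | 0, _, _ => true
  | fuel+1, heap, total =>
    match heap with
    | [] => true  -- heap[0] would raise IndexError; unreachable under Pre_
    | h0 :: t =>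
      if h0 < -1 then
        let largest := -h0
        let remainder := total - largest
        if remainder ≥ largest ∨ remainder < 1 then false
        else
          let new_val := PySem.Int.mod largest remainder
          if new_val = 0 ∧ remainder ≠ 1 then false
          else targetLoopA fuel (pyHeapPushPop (h0 :: t) (-new_val)) (total + (new_val - largest))
      else true

def target_array (target_arr : List Int) : Bool :=
  let st := target_arr.foldl (fun (st : Int × List Int) n => (st.1 + n, st.2 ++ [-n])) (0, [])
  let heap := List.insertionSort (· ≤ ·) st.2
  targetLoopA (target_arr.foldl (fun a x => a + x.natAbs) 0 + 1) heap st.1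

-- ===== PORT B =====
-- scan for the maximum and the index of its first occurrence, starting from lst[0]
def scanMax : List Int → Int → Nat → Nat → Int × Nat
  | [], best, bi, _ => (best, bi)
  | x :: xs, best, bi, i => if best < x then scanMax xs x i (i+1) else scanMax xs best bi (i+1)

def targetLoopB : Nat → List Int → Int → Bool
  | 0, _, _ => true
  | fuel+1, lst, total =>
    match lst with
    | [] => true  -- lst[0] would raise IndexError; unreachable under Pre_
    | h :: t =>
      let p := scanMax t h 0 1
      if p.1 ≤ 1 then true
      else
        let remainder := total - p.1
        if remainder ≥ p.1 ∨ remainder < 1 then false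
        else
          let new_val := PySem.Int.mod p.1 remainder
          if new_val = 0 ∧ remainder ≠ 1 then false
          else targetLoopB fuel (lst.set p.2 new_val) (total + (new_val - p.1))

def target_array_alt (target_arr : List Int) : Bool :=
  targetLoopB (target_arr.foldl (fun a x => a + x.natAbs) 0 + 1) target_arr
    (target_arr.foldl (· + ·) 0)

-- ===== PRECONDITION & SPEC =====
-- Pre_ excludes only the empty list, on which the Python A raises IndexError (heap[0]); B raises there too.
def Pre_target_array (target_arr : List Int) : Prop := target_arr ≠ []
instance (target_arr : List Int) : Decidable (Pre_target_array target_arr) := by unfold Pre_target_array; infer_instance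
def pvWitness_target_array : List Int := [1, 2]

def Spec_target_array (target_arr : List Int) (out : Bool) : Prop := out = target_array_alt target_arr
instance (target_arr : List Int) (out : Bool) : Decidable (Spec_target_array target_arr out) := by unfold Spec_target_array; infer_instance

-- ===== CLAIM (what is proved, stated in full; the proofs are below) =====
def Claim_equal_target_array : Prop := ∀ (target_arr : List Int), Dom_target_array target_arr → Pre_target_array target_arr → Spec_target_array target_arr (target_array target_arr)

-- ===== LEMMAS AND PROOFS =====

-- A's building loop computes (sum, negated copy)
theorem foldA_eq : ∀ (l : List Int) (acc : Int) (accL : List Int),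
    l.foldl (fun (st : Int × List Int) n => (st.1 + n, st.2 ++ [-n])) (acc, accL)
      = (l.foldl (· + ·) acc, accL ++ l.map (fun x => -x)) := by
  intro l
  induction l with
  | nil => intro acc accL; simp [List.foldl]
  | cons x xs ih => intro acc accL; simp [List.foldl, ih]

-- scanMax returns an upper bound of the seed and of the scanned list
theorem scanMax_le : ∀ (xs : List Int) (best : Int) (bi i : Nat),
    best ≤ (scanMax xs best bi i).1 ∧ ∀ x ∈ xs, x ≤ (scanMax xs best bi i).1 := by
  intro xs
  induction xs with
  | nil => intro best bi i; simp [scanMax]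
  | cons y ys ih =>
    intro best bi i
    simp only [scanMax]
    by_cases h : best < y
    · simp only [if_pos h]
      refine ⟨le_of_lt (lt_of_lt_of_le h (ih y i (i+1)).1), ?_⟩
      intro x hx
      rcases List.mem_cons.mp hx with rfl | hx
      · exact (ih x i (i+1)).1
      · exact (ih y i (i+1)).2 x hx
    · simp only [if_neg h]
      refine ⟨(ih best bi (i+1)).1, ?_⟩
      intro x hx
      rcases List.mem_cons.mp hx with rfl | hx
      · exact le_trans (le_of_not_gt h) (ih best bi (i+1)).1
      · exact (ih best bi (i+1)).2 x hx

-- scanMax's index points at its value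
theorem scanMax_idx : ∀ (xs : List Int) (best : Int) (bi i : Nat),
    ((scanMax xs best bi i).1 = best ∧ (scanMax xs best bi i).2 = bi) ∨
      ∃ k, xs[k]? = some (scanMax xs best bi i).1 ∧ (scanMax xs best bi i).2 = i + k := by
  intro xs
  induction xs with
  | nil => intro best bi i; simp [scanMax]
  | cons y ys ih =>
    intro best bi i
    simp only [scanMax]
    by_cases h : best < y
    · simp only [if_pos h]
      rcases ih y i (i+1) with ⟨hv, hj⟩ | ⟨k, hk, hj⟩
      · exact Or.inr ⟨0, by simp [hv], by omega⟩
      · exact Or.inr ⟨k+1, by simpa using hk, by omega⟩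
    · simp only [if_neg h]
      rcases ih best bi (i+1) with ⟨hv, hj⟩ | ⟨k, hk, hj⟩
      · exact Or.inl ⟨hv, hj⟩
      · exact Or.inr ⟨k+1, by simpa using hk, by omega⟩

-- for a nonempty list the scan finds the value at the returned index
theorem scanMax_get (h : Int) (t : List Int) :
    (h :: t)[(scanMax t h 0 1).2]? = some (scanMax t h 0 1).1 := by
  rcases scanMax_idx t h 0 1 with ⟨hv, hj⟩ | ⟨k, hk, hj⟩
  · rw [hj, hv]; rfl
  · rw [hj]
    have h1 : 1 + k = k + 1 := by omega
    rw [h1]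
    simpa using hk

-- head of a sorted permutation of the negated list = minus the maximum found by the scan
theorem head_eq_neg_max (h0 : Int) (th : List Int) (lst : List Int) (m : Int)
    (hs : List.Pairwise (· ≤ ·) (h0 :: th))
    (hp : (h0 :: th).Perm (lst.map (fun x => -x)))
    (hmem : m ∈ lst) (hmax : ∀ x ∈ lst, x ≤ m) : h0 = -m := by
  have h1 : h0 ≤ -m := by
    have : -m ∈ (h0 :: th) := hp.symm.mem_iff.mp (List.mem_map.mpr ⟨m, hmem, rfl⟩)
    rcases List.mem_cons.mp this with he | ht
    · omega
    · exact List.rel_of_pairwise_cons hs ht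
  have h2 : -m ≤ h0 := by
    have : h0 ∈ lst.map (fun x => -x) := hp.mem_iff.mp List.mem_cons_self
    rcases List.mem_map.mp this with ⟨y, hy, rfl⟩
    have := hmax y hy
    omega
  omega

-- the one-step permutation: replacing the root by -v corresponds to setting index j to v
theorem step_perm (h0 v m : Int) (th lst : List Int) (j : Nat)
    (hp : (h0 :: th).Perm (lst.map (fun x => -x)))
    (hget : lst[j]? = some m) (h0eq : h0 = -m) :
    (List.orderedInsert (· ≤ ·) (-v) th).Perm ((lst.set j v).map (fun x => -x)) := by
  obtain ⟨hj, hval⟩ := List.getElem?_eq_some_iff.mp hget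
  set L := lst.map (fun x => -x) with hL
  have hjL : j < L.length := by simpa [hL] using hj
  have hLj : L[j] = -m := by simp [hL, hval]
  have hsplit : L = L.take j ++ (-m) :: L.drop (j+1) := by
    conv_lhs => rw [← List.take_append_drop j L]
    rw [← List.getElem_cons_drop hjL, hLj]
  have hperm1 : L.Perm ((-m) :: (L.take j ++ L.drop (j+1))) := by
    conv_lhs => rw [hsplit]
    exact List.perm_middle
  have hth : th.Perm (L.take j ++ L.drop (j+1)) := by
    have : ((-m) :: th).Perm ((-m) :: (L.take j ++ L.drop (j+1))) := by
      have := hp.trans hperm1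
      rwa [h0eq] at this
    exact this.cons_inv
  have hset : (lst.set j v).map (fun x => -x) = L.take j ++ (-v) :: L.drop (j+1) := by
    rw [List.map_set, ← hL, List.set_eq_take_cons_drop _ hjL]
  refine (List.perm_orderedInsert _ _ _).trans ((hth.cons (-v)).trans ?_)
  rw [hset]
  exact List.perm_middle.symm

-- the two loops agree whenever A's heap is a sorted copy of B's negated list
theorem loop_eq : ∀ (fuel : Nat) (heap lst : List Int) (total : Int),
    List.Pairwise (· ≤ ·) heap → heap.Perm (lst.map (fun x => -x)) →
    targetLoopA fuel heap total = targetLoopB fuel lst total := by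
  intro fuel
  induction fuel with
  | zero => intro heap lst total _ _; rfl
  | succ fuel ih =>
    intro heap lst total hs hp
    cases lst with
    | nil =>
      have he : heap = [] := by simpa using hp.eq_nil
      subst he
      rfl
    | cons h t =>
      obtain ⟨h0, th, he⟩ : ∃ h0 th, heap = h0 :: th := by
        cases heap with
        | nil => exact absurd hp.length_eq (by simp)
        | cons a b => exact ⟨a, b, rfl⟩
      subst he
      have hget : (h :: t)[(scanMax t h 0 1).2]? = some (scanMax t h 0 1).1 := scanMax_get h t
      have hmem : (scanMax t h 0 1).1 ∈ h :: t := List.mem_of_getElem? hget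
      have hmax : ∀ x ∈ h :: t, x ≤ (scanMax t h 0 1).1 := by
        intro x hx
        rcases List.mem_cons.mp hx with rfl | hx
        · exact (scanMax_le t x 0 1).1
        · exact (scanMax_le t h 0 1).2 x hx
      have h0eq : h0 = -(scanMax t h 0 1).1 := head_eq_neg_max h0 th (h :: t) _ hs hp hmem hmax
      subst h0eq
      set m := (scanMax t h 0 1).1 with hmdef
      set j := (scanMax t h 0 1).2 with hjdef
      simp only [targetLoopA, targetLoopB, neg_neg]
      by_cases hm1 : m ≤ 1
      · rw [if_neg (by omega : ¬ (-m < -1)), if_pos hm1]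
      · rw [if_pos (by omega : (-m : Int) < -1), if_neg hm1]
        by_cases hg : total - m ≥ m ∨ total - m < 1
        · rw [if_pos hg, if_pos hg]
        · rw [if_neg hg, if_neg hg]
          have hr1 : (1:Int) ≤ total - m := by omega
          have hrm : total - m < m := by omega
          have hr0 : (0:Int) < total - m := by omega
          have hmod : PySem.Int.mod m (total - m) = m % (total - m) :=
            PySem.Int.mod_eq_emod_of_pos hr0
          have hnv0 : 0 ≤ PySem.Int.mod m (total - m) := by
            rw [hmod]; exact Int.emod_nonneg m (by omega)
          have hnvlt : PySem.Int.mod m (total - m) < total - m := by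
            rw [hmod]; exact Int.emod_lt_of_pos m hr0
          by_cases hg2 : PySem.Int.mod m (total - m) = 0 ∧ total - m ≠ 1
          · rw [if_pos hg2, if_pos hg2]
          · rw [if_neg hg2, if_neg hg2]
            have hpp : pyHeapPushPop (-m :: th) (-(PySem.Int.mod m (total - m)))
                = List.orderedInsert (· ≤ ·) (-(PySem.Int.mod m (total - m))) th := by
              simp only [pyHeapPushPop]
              rw [if_pos (by omega : (-m : Int) < -(PySem.Int.mod m (total - m)))]
            rw [hpp]
            exact ih _ _ _ (hs.of_cons.orderedInsert _ _)
              (step_perm (-m) (PySem.Int.mod m (total - m)) m th (h :: t) j hp hget rfl)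

-- ===== VERDICT (by name: the statement is the Claim_ definition above) =====
theorem target_array_spec : Claim_equal_target_array := by
  intro l _ _
  unfold Spec_target_array target_array target_array_alt
  rw [foldA_eq]
  simp only [List.nil_append]
  exact loop_eq _ _ _ _ (List.pairwise_insertionSort _ _) (List.perm_insertionSort _ _)
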